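-- pv_equiv track=rewrite | github.com/DrSh1ny/AED | ficha3/ficha3.py | algoritmo_2
-- ===== SOURCE A (Python) =====
-- def algoritmo_2(lista):
--     metade=len(lista)/2
--     chave=0
--     for i in range(0,4):
--         mask=2**i
--         count=0
--         for j in range(len(lista)):
--             resultado=lista[j]&mask
--             if(resultado==mask):
--                 count+=1
--         if(count>metade):
--             chave+=mask
--         mask=mask*2 #dumb, already defined at beggining
--     return chave
-- ===== SOURCE B (Python) =====
-- def algoritmo_2(lista):
--     # single pass: four counters updated together, then integer majority test
--     c0 = c1 = c2 = c3 = 0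
--     for x in lista:
--         if x & 1 == 1:
--             c0 += 1
--         if x & 2 == 2:
--             c1 += 1
--         if x & 4 == 4:
--             c2 += 1
--         if x & 8 == 8:
--             c3 += 1
--     n = len(lista)
--     chave = 0
--     if 2 * c0 > n:
--         chave += 1
--     if 2 * c1 > n:
--         chave += 2
--     if 2 * c2 > n:
--         chave += 4
--     if 2 * c3 > n:
--         chave += 8
--     return chave
-- ===== Notes on version B (the rewrite author's own statement) =====
-- stated objective: alternative
-- what changed: B replaces A's four separate rescans of the list (one per bit, with indexed access and a float half-length comparison) by a single foldl-style pass maintaining four counters at once, followed by integer majority tests 2*count > len.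
import Mathlib
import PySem

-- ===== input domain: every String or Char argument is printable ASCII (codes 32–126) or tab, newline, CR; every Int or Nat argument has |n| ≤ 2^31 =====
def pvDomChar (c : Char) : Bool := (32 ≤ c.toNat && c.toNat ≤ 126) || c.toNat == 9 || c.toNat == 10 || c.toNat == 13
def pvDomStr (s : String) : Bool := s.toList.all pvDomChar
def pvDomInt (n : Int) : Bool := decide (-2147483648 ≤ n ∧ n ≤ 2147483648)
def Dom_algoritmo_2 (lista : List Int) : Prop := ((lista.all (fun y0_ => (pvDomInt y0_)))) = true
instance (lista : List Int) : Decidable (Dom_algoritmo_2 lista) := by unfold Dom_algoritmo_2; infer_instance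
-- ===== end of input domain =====

-- B: one pass over the list maintaining four bit counters at once, then integer majority tests,
-- instead of A's four separate indexed rescans with a float half-length comparison (objective: alternative).


-- ===== PORT A =====
-- 'metade = len(lista)/2' is an exact binary float and count, len are ints with |·| ≤ 2^31,
-- so 'count > metade' is ported exactly as '2*count > len'.  The trailing dead rebinding
-- 'mask = mask*2' (mask is re-assigned at the top of each iteration) has no effect and is omitted.
def algoritmo_2 (lista : List Int) : Int :=
  let n : Int := lista.length
  (PySem.List.pyRange 0 4 1).foldl (fun chave i =>
    let mask : Int := 2 ^ i.toNat
    let count : Int := (PySem.List.pyRange 0 n 1).foldl (fun count j =>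
      let resultado := PySem.Int.band (PySem.List.pyGetD lista j 0) mask
      if resultado == mask then count + 1 else count) 0
    if 2 * count > n then chave + mask else chave) 0

-- ===== PORT B =====
def algoritmo_2_alt (lista : List Int) : Int :=
  let cs : Int × Int × Int × Int := lista.foldl (fun cs x =>
    (if PySem.Int.band x 1 == 1 then cs.1 + 1 else cs.1,
     if PySem.Int.band x 2 == 2 then cs.2.1 + 1 else cs.2.1,
     if PySem.Int.band x 4 == 4 then cs.2.2.1 + 1 else cs.2.2.1,
     if PySem.Int.band x 8 == 8 then cs.2.2.2 + 1 else cs.2.2.2)) (0, 0, 0, 0)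
  let n : Int := lista.length
  let chave : Int := 0
  let chave := if 2 * cs.1 > n then chave + 1 else chave
  let chave := if 2 * cs.2.1 > n then chave + 2 else chave
  let chave := if 2 * cs.2.2.1 > n then chave + 4 else chave
  let chave := if 2 * cs.2.2.2 > n then chave + 8 else chave
  chave

-- ===== PRECONDITION & SPEC =====
def Spec_algoritmo_2 (lista : List Int) (out : Int) : Prop := out = algoritmo_2_alt lista
instance (lista : List Int) (out : Int) : Decidable (Spec_algoritmo_2 lista out) := by unfold Spec_algoritmo_2; infer_instance

-- ===== CLAIM (what is proved, stated in full; the proofs are below) =====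
def Claim_equal_algoritmo_2 : Prop := ∀ (lista : List Int), Dom_algoritmo_2 lista → Spec_algoritmo_2 lista (algoritmo_2 lista)

-- ===== LEMMAS AND PROOFS =====

-- A's per-bit count, as a fold over the elements (after removing the index access).
def pvCnt (m : Int) (xs : List Int) : Int :=
  xs.foldl (fun c x => if PySem.Int.band x m == m then c + 1 else c) 0

theorem pvCnt_shift (m : Int) (xs : List Int) (a : Int) :
    xs.foldl (fun c x => if PySem.Int.band x m == m then c + 1 else c) a = a + pvCnt m xs := by
  induction xs generalizing a with
  | nil => simp [pvCnt]
  | cons x xs ih =>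
    simp only [pvCnt, List.foldl_cons]
    rw [ih, ih]
    split <;> ring

-- B's single pass computes the four per-bit counts of A.
theorem pvFold4 (xs : List Int) (a b c d : Int) :
    xs.foldl (fun cs x =>
      ((if PySem.Int.band x 1 == 1 then cs.1 + 1 else cs.1,
        if PySem.Int.band x 2 == 2 then cs.2.1 + 1 else cs.2.1,
        if PySem.Int.band x 4 == 4 then cs.2.2.1 + 1 else cs.2.2.1,
        if PySem.Int.band x 8 == 8 then cs.2.2.2 + 1 else cs.2.2.2) : Int × Int × Int × Int))
      (a, b, c, d)
    = (a + pvCnt 1 xs, b + pvCnt 2 xs, c + pvCnt 4 xs, d + pvCnt 8 xs) := by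
  induction xs generalizing a b c d with
  | nil => simp [pvCnt]
  | cons x xs ih =>
    rw [List.foldl_cons, ih]
    have e : ∀ m : Int, pvCnt m (x :: xs)
        = (if PySem.Int.band x m == m then (1 : Int) else 0) + pvCnt m xs := by
      intro m
      have u : pvCnt m (x :: xs)
          = xs.foldl (fun c x => if PySem.Int.band x m == m then c + 1 else c)
              (if PySem.Int.band x m == m then (0 : Int) + 1 else 0) := rfl
      rw [u, pvCnt_shift]
      split <;> ring
    simp only [e]
    split_ifs <;> simp [Prod.ext_iff] <;> omega

-- ===== VERDICT (by name: the statement is the Claim_ definition above) =====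
theorem algoritmo_2_spec : Claim_equal_algoritmo_2 := by
  intro lista _
  show algoritmo_2 lista = algoritmo_2_alt lista
  unfold algoritmo_2 algoritmo_2_alt
  have hr : PySem.List.pyRange 0 4 1 = [0, 1, 2, 3] := by decide
  have p2 : (2 : Int) ^ Int.toNat 2 = 4 := by decide
  have p3 : (2 : Int) ^ Int.toNat 3 = 8 := by decide
  simp only [hr, List.foldl_cons, List.foldl_nil, pvFold4, p2, p3]
  have hc : ∀ m : Int,
      (PySem.List.pyRange 0 (lista.length : Int) 1).foldl (fun count j =>
        if PySem.Int.band (PySem.List.pyGetD lista j 0) m == m then count + 1 else count) 0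
      = pvCnt m lista := by
    intro m
    exact PySem.List.foldl_pyRange_zero_pyGetD' lista 0
      (fun c x => if PySem.Int.band x m == m then c + 1 else c) 0
  simp only [hc]
  norm_num
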